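-- pv_equiv track=rewrite | github.com/ldshi/practice-and-accumulation | codility.com/20160330/high_speed_camera_cover/high_speed_camera_cover.py | build_initial_tree
-- ===== SOURCE A (Python) =====
-- def build_initial_tree(root, A, B):
--   tree = {}
--
--   tmp_start_nodes = [root]
--   while len(tmp_start_nodes) > 0:
--
--     tmp_end_nodes = []
--     tmp_idx = len(A) - 1
--     while tmp_idx >= 0:
--       if A[tmp_idx] == tmp_start_nodes[0]:
--         tmp_end_nodes.append(B[tmp_idx])
--         del A[tmp_idx]
--         del B[tmp_idx]
--       tmp_idx -= 1
--
--     if len(tmp_end_nodes):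
--       tree[tmp_start_nodes[0]] = tmp_end_nodes
--
--     del tmp_start_nodes[0]
--     tmp_start_nodes += tmp_end_nodes
--
--   return tree
-- ===== SOURCE B (Python) =====
-- def build_initial_tree(root, A, B):
--     # group edges by parent once, children in reverse index order (A's order)
--     groups = {}
--     for a, b in reversed(list(zip(A, B))):
--         groups.setdefault(a, []).append(b)
--     tree = {}
--     pending = [root]
--     while pending:
--         v = pending.pop(0)
--         kids = groups.pop(v, None)
--         if kids:
--             tree[v] = kids
--             pending += kids
--     return tree
-- ===== Notes on version B (the rewrite author's own statement) =====
-- stated objective: alternative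
-- what changed: B groups all edges by parent in one pass over reversed(zip(A, B)) into a dict and then runs a single BFS that pops each visited node's ready-made child list, instead of A's rescan of the whole (mutated) edge arrays for every node in the queue.
-- outside the precondition, e.g. on build_initial_tree(1, [5, 2], [2]): A returns {}, B returns {}
import Mathlib
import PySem

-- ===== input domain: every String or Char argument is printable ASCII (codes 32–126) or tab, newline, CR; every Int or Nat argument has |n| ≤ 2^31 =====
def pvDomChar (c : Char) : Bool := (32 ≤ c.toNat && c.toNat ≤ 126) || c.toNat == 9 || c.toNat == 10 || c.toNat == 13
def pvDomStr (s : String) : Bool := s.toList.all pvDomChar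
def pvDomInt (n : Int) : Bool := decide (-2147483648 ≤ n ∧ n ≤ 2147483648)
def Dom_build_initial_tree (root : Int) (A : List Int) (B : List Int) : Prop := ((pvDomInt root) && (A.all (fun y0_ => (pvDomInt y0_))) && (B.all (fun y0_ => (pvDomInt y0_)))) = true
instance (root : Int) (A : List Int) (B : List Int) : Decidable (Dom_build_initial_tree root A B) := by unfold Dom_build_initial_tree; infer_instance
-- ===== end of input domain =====

-- B replaces A's per-node rescan-and-delete of the edge arrays by one grouping pass over the
-- edges plus a single BFS consuming the groups; Python A mutates its A/B list arguments in
-- place (B does not): the equivalence proved here is about the RETURN value only.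


-- ===== PORT A =====
-- inner 'while tmp_idx >= 0' loop: idx counts down; on a match Python appends B[tmp_idx] and
-- deletes both entries ('del' = PySem.List.pop?).  Where B[tmp_idx] is out of range Python
-- raises IndexError (excluded by Pre_); there the port makes that step a no-op.
def scanA (s : Int) : Nat → List Int → List Int → List Int → List Int × List Int × List Int
  | 0, A, B, acc => (acc, A, B)
  | i+1, A, B, acc =>
    if PySem.List.pyGet? A (i : Int) == some s then
      match PySem.List.pop? A (i : Int), PySem.List.pop? B (i : Int) with
      | some pa, some pb => scanA s i pa.2 pb.2 (acc ++ [pb.1])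
      | _, _ => scanA s i A B acc
    else scanA s i A B acc

-- length bookkeeping, cited by loopA's termination proof
theorem scanA_len (s : Int) : ∀ (i : Nat) (A B acc : List Int),
    (scanA s i A B acc).1.length + (scanA s i A B acc).2.1.length = acc.length + A.length := by
  intro i
  induction i with
  | zero => intro A B acc; simp [scanA]
  | succ i ih =>
    intro A B acc
    simp only [scanA]
    split
    · rcases hA : PySem.List.pop? A (i : Int) with _ | pa
      · simpa using ih A B acc
      · rcases hB : PySem.List.pop? B (i : Int) with _ | pb
        · simpa using ih A B acc
        · have hlen := PySem.List.length_of_pop?_eq_some A hA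
          simp only [hA, hB]
          rw [ih pa.2 pb.2 (acc ++ [pb.1])]
          simp only [List.length_append, List.length_cons, List.length_nil]
          omega
    · exact ih A B acc

-- outer 'while len(tmp_start_nodes) > 0' loop
def loopA (tree : PySem.Dict Int (List Int)) (queue A B : List Int) : PySem.Dict Int (List Int) :=
  match queue with
  | [] => tree
  | s :: rest =>
    let r := scanA s A.length A B []
    loopA (if r.1.length ≠ 0 then tree.insert s r.1 else tree) (rest ++ r.1) r.2.1 r.2.2
  termination_by A.length + queue.length
  decreasing_by
    have h := scanA_len s A.length A B []
    simp only [List.length_append, List.length_cons, List.length_nil] at h ⊢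
    omega

def build_initial_tree (root : Int) (A : List Int) (B : List Int) : List (Int × List Int) :=
  (loopA PySem.Dict.empty [root] A B).items

-- ===== PORT B =====
-- one grouping pass: for a, b in reversed(list(zip(A, B))): groups.setdefault(a, []).append(b)
def groupsB (pairs : List (Int × Int)) : PySem.Dict Int (List Int) :=
  pairs.reverse.foldl (fun d p => d.modify p.1 [] (fun v => v ++ [p.2])) PySem.Dict.empty

-- cited by bfsB's termination proof
theorem filter_length_lt {α : Type} (l : List α) (p : α → Bool) (x : α) (hx : x ∈ l)
    (hpx : p x = false) : (l.filter p).length < l.length := by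
  induction l with
  | nil => cases hx
  | cons a l ih =>
    rcases List.mem_cons.mp hx with rfl | hx2
    · simp only [List.filter_cons, hpx, List.length_cons]
      exact Nat.lt_succ_of_le (List.length_filter_le _ _)
    · by_cases hpa : p a = true
      · simp only [List.filter_cons, hpa, if_true, List.length_cons]
        exact Nat.succ_lt_succ (ih hx2)
      · simp only [List.filter_cons, if_neg hpa, List.length_cons]
        exact Nat.lt_succ_of_lt (ih hx2)

theorem pop?_size_lt {κ ν : Type} [BEq κ] (d : PySem.Dict κ ν) (k : κ) (r : ν × PySem.Dict κ ν)
    (h : d.pop? k = some r) : r.2.size < d.size := by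
  rcases hg : d.get? k with _ | w
  · simp [PySem.Dict.pop?, hg] at h
  · simp only [PySem.Dict.pop?, hg, Option.map_some] at h
    cases h
    have hmem : ∃ p ∈ d.items, ¬ (!(p.1 == k)) = true := by
      simp only [PySem.Dict.get?] at hg
      rcases Option.map_eq_some_iff.mp hg with ⟨p, hf, _⟩
      exact ⟨p, List.mem_of_find?_eq_some hf, by simp [List.find?_some hf]⟩
    simp only [PySem.Dict.size, PySem.Dict.erase]
    rcases hmem with ⟨p, hp, hnp⟩
    exact filter_length_lt d.items _ p hp (by simpa using hnp)

-- BFS consuming the groups: v = pending.pop(0); kids = groups.pop(v, None); if kids: …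
def bfsB (tree : PySem.Dict Int (List Int)) (queue : List Int) (groups : PySem.Dict Int (List Int)) :
    PySem.Dict Int (List Int) :=
  match queue with
  | [] => tree
  | v :: rest =>
    match hp : groups.pop? v with
    | none => bfsB tree rest groups
    | some kg =>
      if kg.1.length ≠ 0 then bfsB (tree.insert v kg.1) (rest ++ kg.1) kg.2
      else bfsB tree rest kg.2
  termination_by (groups.size, queue.length)
  decreasing_by
    · exact Prod.Lex.right _ (by simp)
    · exact Prod.Lex.left _ _ (pop?_size_lt groups v kg hp)
    · exact Prod.Lex.left _ _ (pop?_size_lt groups v kg hp)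

def build_initial_tree_alt (root : Int) (A : List Int) (B : List Int) : List (Int × List Int) :=
  (bfsB PySem.Dict.empty [root] (groupsB (A.zip B))).items

-- ===== PRECONDITION & SPEC =====
-- Pre_ excludes inputs where some unpaired trailing A[i] (index ≥ len(B)) equals root or occurs
-- in B: on such inputs Python A can reach B[i] with i out of range and raise IndexError (on the
-- unreachable subset A still returns, and B returns the same value there — see claim.json cites).
def Pre_build_initial_tree (root : Int) (A : List Int) (B : List Int) : Prop :=
  ∀ x ∈ A.drop B.length, x ≠ root ∧ x ∉ B
instance (root : Int) (A : List Int) (B : List Int) : Decidable (Pre_build_initial_tree root A B) := by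
  unfold Pre_build_initial_tree; infer_instance

def pvWitness_build_initial_tree : Int × List Int × List Int := (1, [1, 2], [2, 3])

def Spec_build_initial_tree (root : Int) (A : List Int) (B : List Int) (out : List (Int × List Int)) : Prop := out = build_initial_tree_alt root A B
instance (root : Int) (A : List Int) (B : List Int) (out : List (Int × List Int)) : Decidable (Spec_build_initial_tree root A B out) := by unfold Spec_build_initial_tree; infer_instance

-- ===== CLAIM (what is proved, stated in full; the proofs are below) =====
def Claim_equal_build_initial_tree : Prop := ∀ (root : Int) (A : List Int) (B : List Int), Dom_build_initial_tree root A B → Pre_build_initial_tree root A B → Spec_build_initial_tree root A B (build_initial_tree root A B)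

-- ===== LEMMAS AND PROOFS =====

-- children of s in A's (reverse index) order, and the edge list without s's edges
def msP (s : Int) (P : List (Int × Int)) : List Int :=
  (P.reverse.filter (fun p => p.1 == s)).map (fun p => p.2)
def filtP (s : Int) (P : List (Int × Int)) : List (Int × Int) :=
  P.filter (fun p => !(p.1 == s))

-- the lookup relation loopA's list state and bfsB's dict state share
def invGroups (groups : PySem.Dict Int (List Int)) (P : List (Int × Int)) : Prop :=
  ∀ k : Int, groups.get? k = if msP k P = [] then none else some (msP k P)

theorem eraseIdx_append_cons (l t : List Int) (x : Int) :
    (l ++ x :: t).eraseIdx l.length = l ++ t := by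
  induction l with
  | nil => rfl
  | cons a l ih => simpa [List.eraseIdx] using ih

theorem pyGet?_append_cons (l t : List Int) (x : Int) :
    PySem.List.pyGet? (l ++ x :: t) (l.length : Int) = some x := by
  rw [PySem.List.pyGet?_natCast]
  rw [List.getElem?_append_right (le_refl l.length)]
  simp

theorem pop?_append_cons (l t : List Int) (x : Int) :
    PySem.List.pop? (l ++ x :: t) (l.length : Int) = some (x, l ++ t) := by
  rw [PySem.List.pop?_natCast _ _ (by simp)]
  have h1 : (l ++ x :: t)[l.length]'(by simp) = x := List.getElem_of_append rfl rfl
  rw [h1, eraseIdx_append_cons]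

theorem pop?_of_le (B : List Int) (j : Nat) (h : B.length ≤ j) :
    PySem.List.pop? B (j : Int) = none := by
  have h1 : ¬ ((j : Int) < (B.length : Int)) := by exact_mod_cast not_lt.mpr h
  simp [PySem.List.pop?, PySem.List.pyIdx?, h1]

theorem scanA_tail (s : Int) (k : Nat) : ∀ (n : Nat) (A B acc : List Int), B.length ≤ n →
    scanA s (n + k) A B acc = scanA s n A B acc := by
  induction k with
  | zero => intro n A B acc _; rfl
  | succ k ih =>
    intro n A B acc h
    rw [show n + (k+1) = (n+k)+1 from rfl]
    simp only [scanA]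
    rcases hA : PySem.List.pop? A ((n+k : Nat) : Int) with _ | pa <;>
      rw [pop?_of_le B (n+k) (by omega)] <;> split <;> exact ih n A B acc h

theorem scanA_zip (s : Int) (P : List (Int × Int)) : ∀ (TA TB acc : List Int),
    scanA s P.length (P.map Prod.fst ++ TA) (P.map Prod.snd ++ TB) acc
      = (acc ++ msP s P, (filtP s P).map Prod.fst ++ TA, (filtP s P).map Prod.snd ++ TB) := by
  induction P using List.reverseRecOn with
  | nil => intro TA TB acc; simp [scanA, msP, filtP]
  | append_singleton P₀ p ih =>
    obtain ⟨a, b⟩ := p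
    intro TA TB acc
    have hA : (P₀ ++ [(a,b)]).map Prod.fst ++ TA = P₀.map Prod.fst ++ (a :: TA) := by simp
    have hB : (P₀ ++ [(a,b)]).map Prod.snd ++ TB = P₀.map Prod.snd ++ (b :: TB) := by simp
    have hlen : (P₀ ++ [(a,b)]).length = P₀.length + 1 := by simp
    rw [hA, hB, hlen]
    simp only [scanA]
    have hga : PySem.List.pyGet? (P₀.map Prod.fst ++ a :: TA) (P₀.length : Int) = some a := by
      simpa using pyGet?_append_cons (P₀.map Prod.fst) TA a
    rw [hga]
    by_cases hs : a = s
    · rw [if_pos (by simp [hs])]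
      have hpa : PySem.List.pop? (P₀.map Prod.fst ++ a :: TA) (P₀.length : Int)
          = some (a, P₀.map Prod.fst ++ TA) := by
        simpa using pop?_append_cons (P₀.map Prod.fst) TA a
      have hpb : PySem.List.pop? (P₀.map Prod.snd ++ b :: TB) (P₀.length : Int)
          = some (b, P₀.map Prod.snd ++ TB) := by
        simpa using pop?_append_cons (P₀.map Prod.snd) TB b
      rw [hpa, hpb]
      show scanA s P₀.length (P₀.map Prod.fst ++ TA) (P₀.map Prod.snd ++ TB) (acc ++ [b])
        = (acc ++ msP s (P₀ ++ [(a,b)]), (filtP s (P₀ ++ [(a,b)])).map Prod.fst ++ TA,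
            (filtP s (P₀ ++ [(a,b)])).map Prod.snd ++ TB)
      rw [ih TA TB (acc ++ [b])]
      simp [msP, filtP, hs, List.filter_append]
    · rw [if_neg (by simp [hs])]
      rw [ih (a :: TA) (b :: TB) acc]
      simp [msP, filtP, hs, List.filter_append]

theorem map_fst_zip_take (A : List Int) : ∀ (B : List Int), (A.zip B).map Prod.fst = A.take B.length := by
  induction A with
  | nil => intro B; simp
  | cons a A ih => intro B; cases B with
    | nil => simp
    | cons b B => simp [ih]

theorem map_snd_zip_take (A : List Int) : ∀ (B : List Int), (A.zip B).map Prod.snd = B.take A.length := by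
  induction A with
  | nil => intro B; simp
  | cons a A ih => intro B; cases B with
    | nil => simp
    | cons b B => simp [ih]

theorem zip_fst_recomp (A B : List Int) : (A.zip B).map Prod.fst ++ A.drop B.length = A := by
  rw [map_fst_zip_take, List.take_append_drop]

theorem zip_snd_recomp (A B : List Int) : (A.zip B).map Prod.snd ++ B.drop A.length = B := by
  rw [map_snd_zip_take, List.take_append_drop]

theorem scanA_spec (s : Int) (A B : List Int) :
    scanA s A.length A B [] =
      (msP s (A.zip B),
       (filtP s (A.zip B)).map Prod.fst ++ A.drop B.length,
       (filtP s (A.zip B)).map Prod.snd ++ B.drop A.length) := by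
  have hz := scanA_zip s (A.zip B) (A.drop B.length) (B.drop A.length) []
  rw [zip_fst_recomp, zip_snd_recomp] at hz
  simp only [List.nil_append] at hz
  by_cases h : B.length ≤ A.length
  · have hlen : A.length = (A.zip B).length + (A.drop B.length).length := by
      simp only [List.length_zip, List.length_drop]; omega
    have ht := scanA_tail s (A.drop B.length).length (A.zip B).length A B []
      (by simp only [List.length_zip]; omega)
    conv_lhs => rw [hlen]
    rw [ht]
    exact hz
  · have hlen0 : A.length = (A.zip B).length := by
      simp only [List.length_zip]
      omega
    conv_lhs => rw [hlen0]
    exact hz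

theorem find?_filter_ne {ν : Type} (items : List (Int × ν)) (s k : Int) (hks : k ≠ s) :
    List.find? (fun p => p.1 == k) (items.filter (fun p => !(p.1 == s)))
      = List.find? (fun p => p.1 == k) items := by
  induction items with
  | nil => rfl
  | cons p rest ih =>
    by_cases h1 : p.1 = s
    · rw [List.filter_cons_of_neg (by simp [h1])]
      rw [List.find?_cons_of_neg (by simp [h1]; exact fun e => hks e.symm)]
      exact ih
    · rw [List.filter_cons_of_pos (by simp [h1])]
      by_cases h2 : p.1 = k
      · rw [List.find?_cons_of_pos (by simp [h2]), List.find?_cons_of_pos (by simp [h2])]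
      · rw [List.find?_cons_of_neg (by simp [h2]), List.find?_cons_of_neg (by simp [h2])]
        exact ih

theorem get?_erase_self {ν : Type} (d : PySem.Dict Int ν) (s : Int) :
    (d.erase s).get? s = none := by
  obtain ⟨items⟩ := d
  simp only [PySem.Dict.erase, PySem.Dict.get?]
  rw [List.find?_eq_none.mpr (by intro x hx; have h2 := (List.mem_filter.mp hx).2; simpa using h2)]
  rfl

theorem get?_erase_ne {ν : Type} (d : PySem.Dict Int ν) (s k : Int) (h : k ≠ s) :
    (d.erase s).get? k = d.get? k := by
  obtain ⟨items⟩ := d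
  simp only [PySem.Dict.erase, PySem.Dict.get?]
  rw [find?_filter_ne items s k h]

theorem msP_eq_nil_iff (k : Int) (P : List (Int × Int)) :
    msP k P = [] ↔ ∀ p ∈ P, ¬ p.1 = k := by
  simp [msP, List.map_eq_nil_iff, List.filter_eq_nil_iff]

theorem filtP_of_msP_nil {k : Int} {P : List (Int × Int)} (h : msP k P = []) : filtP k P = P := by
  rw [filtP, List.filter_eq_self]
  intro p hp
  have := (msP_eq_nil_iff k P).mp h p hp
  simp [this]

theorem msP_filtP_self (s : Int) (P : List (Int × Int)) : msP s (filtP s P) = [] := by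
  unfold msP filtP
  rw [← List.filter_reverse, List.filter_filter]
  simp

theorem msP_filtP_ne (k s : Int) (P : List (Int × Int)) (h : k ≠ s) :
    msP k (filtP s P) = msP k P := by
  unfold msP filtP
  rw [← List.filter_reverse, List.filter_filter]
  congr 1
  apply List.filter_congr
  intro p hp
  by_cases h2 : p.1 = k
  · simp [h2, h]
  · simp [h2]

theorem zip_parts (F : List (Int × Int)) (TA TB : List Int) (h : TA = [] ∨ TB = []) :
    (F.map Prod.fst ++ TA).zip (F.map Prod.snd ++ TB) = F := by
  have hlen : (F.map Prod.fst).length = (F.map Prod.snd).length := by simp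
  rw [List.zip_append hlen]
  have hz : (F.map Prod.fst).zip (F.map Prod.snd) = F := by
    rw [List.zip_map']
    simp
  rcases h with h | h <;> simp [hz, h]

theorem loopA_nil (tree : PySem.Dict Int (List Int)) (A B : List Int) :
    loopA tree [] A B = tree := by
  simp only [loopA]

theorem loopA_cons (tree : PySem.Dict Int (List Int)) (s : Int) (rest A B : List Int) :
    loopA tree (s :: rest) A B =
      loopA (if (scanA s A.length A B []).1.length ≠ 0
               then tree.insert s (scanA s A.length A B []).1 else tree)
        (rest ++ (scanA s A.length A B []).1)
        (scanA s A.length A B []).2.1 (scanA s A.length A B []).2.2 := by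
  simp only [loopA]

theorem bfsB_nil (tree groups : PySem.Dict Int (List Int)) : bfsB tree [] groups = tree := by
  simp only [bfsB]

theorem bfsB_cons_none (tree : PySem.Dict Int (List Int)) (v : Int) (rest : List Int)
    (groups : PySem.Dict Int (List Int)) (h : groups.pop? v = none) :
    bfsB tree (v :: rest) groups = bfsB tree rest groups := by
  rw [bfsB]
  split
  · rfl
  · next kg heq => rw [h] at heq; cases heq

theorem bfsB_cons_some (tree : PySem.Dict Int (List Int)) (v : Int) (rest : List Int)
    (groups : PySem.Dict Int (List Int)) (kids : List Int) (groups' : PySem.Dict Int (List Int))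
    (h : groups.pop? v = some (kids, groups')) :
    bfsB tree (v :: rest) groups =
      (if kids.length ≠ 0 then bfsB (tree.insert v kids) (rest ++ kids) groups'
       else bfsB tree rest groups') := by
  rw [bfsB]
  split
  · next heq => rw [h] at heq; cases heq
  · next kg heq => rw [h] at heq; cases heq; rfl

theorem sim : ∀ (n : Nat) (queue A B : List Int), A.length + queue.length ≤ n →
    ∀ (tree groups : PySem.Dict Int (List Int)), invGroups groups (A.zip B) →
    loopA tree queue A B = bfsB tree queue groups := by
  intro n
  induction n with
  | zero =>
    intro queue A B h tree groups _
    cases queue with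
    | nil => rw [loopA_nil, bfsB_nil]
    | cons s rest => simp at h
  | succ n ih =>
    intro queue A B h tree groups hinv
    cases queue with
    | nil => rw [loopA_nil, bfsB_nil]
    | cons s rest =>
      have hspec := scanA_spec s A B
      rw [loopA_cons, hspec]
      dsimp only
      by_cases hm : msP s (A.zip B) = []
      · have hF := filtP_of_msP_nil hm
        rw [hm, hF, zip_fst_recomp, zip_snd_recomp]
        simp only [List.length_nil, ne_eq, not_true_eq_false, if_false, List.append_nil]
        have hnone : groups.pop? s = none := by
          have hg := hinv s
          rw [if_pos hm] at hg
          simp [PySem.Dict.pop?, hg]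
        rw [bfsB_cons_none _ _ _ _ hnone]
        exact ih rest A B (by simp only [List.length_cons] at h; omega) tree groups hinv
      · have hget : groups.get? s = some (msP s (A.zip B)) := by rw [hinv s, if_neg hm]
        have hsome : groups.pop? s = some (msP s (A.zip B), groups.erase s) := by
          simp [PySem.Dict.pop?, hget]
        rw [bfsB_cons_some _ _ _ _ _ _ hsome]
        have hlen_ne : (msP s (A.zip B)).length ≠ 0 := by
          intro e; exact hm (List.eq_nil_of_length_eq_zero e)
        rw [if_pos hlen_ne, if_pos hlen_ne]
        have htails : A.drop B.length = [] ∨ B.drop A.length = [] := by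
          rcases le_total A.length B.length with hle | hle
          · exact Or.inl (List.drop_eq_nil_of_le hle)
          · exact Or.inr (List.drop_eq_nil_of_le hle)
        have hz := zip_parts (filtP s (A.zip B)) (A.drop B.length) (B.drop A.length) htails
        have hmeasure : ((filtP s (A.zip B)).map Prod.fst ++ A.drop B.length).length
            + (rest ++ msP s (A.zip B)).length ≤ n := by
          have hsl := scanA_len s A.length A B []
          rw [hspec] at hsl
          dsimp only at hsl
          simp only [List.length_nil, List.length_append, List.length_cons, zero_add] at hsl h ⊢
          omega
        refine Eq.trans (ih _ _ _ hmeasure _ (groups.erase s) ?_) rfl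
        intro k
        rw [hz]
        by_cases hk : k = s
        · subst hk
          rw [get?_erase_self, msP_filtP_self, if_pos rfl]
        · rw [get?_erase_ne _ _ _ hk, msP_filtP_ne k s _ hk, hinv k]

theorem inv_groupsB (P : List (Int × Int)) : invGroups (groupsB P) P := by
  intro k
  have hD : (groupsB P).getD k [] = msP k P := by
    unfold groupsB msP
    rw [PySem.Dict.getD_foldl_modify_append]
    simp [PySem.Dict.getD_empty]
  have hkeys : (groupsB P).keys = PySem.Set.ofList (P.reverse.map Prod.fst) := by
    unfold groupsB
    rw [PySem.Dict.keys_foldl_modify_key P.reverse Prod.fst [] (fun _ p v => v ++ [p.2])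
      PySem.Dict.empty]
    rw [PySem.Dict.keys_empty, PySem.Set.ofList_eq_foldl]
    rfl
  by_cases hk : msP k P = []
  · rw [if_pos hk]
    rw [PySem.Dict.get?_eq_none_iff_contains]
    have hnc : ¬ (groupsB P).contains k = true := by
      rw [PySem.Dict.contains_iff_mem_keys, hkeys, PySem.Set.mem_ofList]
      intro hmem
      rcases List.mem_map.mp hmem with ⟨p, hp, hpk⟩
      have hne : msP k P ≠ [] := by
        unfold msP
        intro hnil
        rw [List.map_eq_nil_iff] at hnil
        exact (List.filter_eq_nil_iff.mp hnil p hp) (by simp [hpk])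
      exact hne hk
    simpa using hnc
  · rw [if_neg hk]
    have hcont : (groupsB P).contains k = true := by
      rw [PySem.Dict.contains_iff_mem_keys, hkeys, PySem.Set.mem_ofList]
      have hfil : P.reverse.filter (fun p => p.1 == k) ≠ [] := by
        intro e
        exact hk (by unfold msP; rw [e]; rfl)
      rcases List.exists_mem_of_ne_nil _ hfil with ⟨p, hp⟩
      exact List.mem_map.mpr ⟨p, List.mem_of_mem_filter hp, by simpa using List.of_mem_filter hp⟩
    rcases hg : (groupsB P).get? k with _ | w
    · rw [PySem.Dict.get?_eq_none_iff_contains] at hg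
      exact absurd hcont (by simp [hg])
    · have hw : msP k P = w := by
        rw [← hD, PySem.Dict.getD_eq_get?_getD, hg]
        rfl
      rw [hw]

-- ===== VERDICT (by name: the statement is the Claim_ definition above) =====
theorem build_initial_tree_spec : Claim_equal_build_initial_tree := by
  intro root A B _hdom _hpre
  show build_initial_tree root A B = build_initial_tree_alt root A B
  unfold build_initial_tree build_initial_tree_alt
  exact congrArg PySem.Dict.items
    (sim (A.length + 1) [root] A B (by simp) PySem.Dict.empty (groupsB (A.zip B))
      (inv_groupsB (A.zip B)))
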